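-- pv_equiv track=rewrite | github.com/WilliamPltr/Qr-code-dynamic | make_qr.py | estimate_min_version
-- ===== SOURCE A (Python) =====
-- def estimate_min_version(data: str) -> int:
--     """Estime grossièrement la version nécessaire pour une URL ASCII.
--
--     Cette estimation est volontairement simple pour émettre un warning si > max_version.
--     Basé sur la capacité approx. pour niveau H (~30% redondance). Version 5 H ~ 68 char alphanum.
--     """
--     length = len(data)
--     thresholds = [
--         (1, 9),  # V1-H ~ 9
--         (2, 16),  # V2-H ~ 16
--         (3, 26),  # V3-H ~ 26
--         (4, 36),  # V4-H ~ 36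
--         (5, 68),  # V5-H ~ 68
--         (6, 86),
--         (7, 108),
--         (8, 124),
--         (9, 157),
--         (10, 189),
--     ]
--     for version, capacity in thresholds:
--         if length <= capacity:
--             return version
--     return 10
-- ===== SOURCE B (Python) =====
-- CAPS = [9, 16, 26, 36, 68, 86, 108, 124, 157, 189]
--
-- def estimate_min_version(data: str) -> int:
--     """Binary-search the capacity table for the first capacity >= len(data)."""
--     length = len(data)
--     lo, hi = 0, len(CAPS)
--     while lo < hi:
--         mid = (lo + hi) // 2
--         if CAPS[mid] < length:
--             lo = mid + 1
--         else:
--             hi = mid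
--     return min(lo + 1, 10)
-- ===== Notes on version B (the rewrite author's own statement) =====
-- stated objective: alternative
-- what changed: Replaces the sequential scan of the (version, capacity) threshold list with a hand-written binary search (bisect_left) over the sorted capacity table, clamping the resulting index to version 10.
import Mathlib
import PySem

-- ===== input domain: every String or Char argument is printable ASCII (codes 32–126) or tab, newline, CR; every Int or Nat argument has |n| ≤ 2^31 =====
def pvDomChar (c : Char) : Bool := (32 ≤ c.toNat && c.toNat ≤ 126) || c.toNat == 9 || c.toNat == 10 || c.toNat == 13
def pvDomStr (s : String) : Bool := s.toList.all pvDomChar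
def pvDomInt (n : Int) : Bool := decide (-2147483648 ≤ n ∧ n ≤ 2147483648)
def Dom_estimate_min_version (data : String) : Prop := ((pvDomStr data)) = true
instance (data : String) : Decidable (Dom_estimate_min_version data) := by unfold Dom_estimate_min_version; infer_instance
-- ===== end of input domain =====

-- ===== PORT A =====
-- B changes: binary search over the sorted capacity table instead of a sequential
-- scan of the threshold list (objective: alternative; same behaviour, same tiny cost).
def scanThresholds (length : Int) : List (Int × Int) → Int
  | [] => 10
  | (version, capacity) :: rest =>
      if length ≤ capacity then version else scanThresholds length rest

def estimate_min_version (data : String) : Int :=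
  scanThresholds (PySem.Str.len data)
    [(1, 9), (2, 16), (3, 26), (4, 36), (5, 68), (6, 86), (7, 108), (8, 124), (9, 157), (10, 189)]

-- ===== PORT B =====
def pvCaps : List Int := [9, 16, 26, 36, 68, 86, 108, 124, 157, 189]

-- the while-loop of Source B: bisect_left on pvCaps between indices lo and hi
def bisectLoop (length : Int) (lo hi : Nat) : Nat :=
  if lo < hi then
    let mid := (lo + hi) / 2
    if pvCaps.getD mid 0 < length then bisectLoop length (mid + 1) hi
    else bisectLoop length lo mid
  else lo
termination_by hi - lo
decreasing_by all_goals omega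

def estimate_min_version_alt (data : String) : Int :=
  min ((bisectLoop (PySem.Str.len data) 0 pvCaps.length : Int) + 1) 10

-- ===== PRECONDITION & SPEC =====
def Spec_estimate_min_version (data : String) (out : Int) : Prop := out = estimate_min_version_alt data
instance (data : String) (out : Int) : Decidable (Spec_estimate_min_version data out) := by unfold Spec_estimate_min_version; infer_instance

-- ===== CLAIM (what is proved, stated in full; the proofs are below) =====
def Claim_equal_estimate_min_version : Prop := ∀ (data : String), Dom_estimate_min_version data → Spec_estimate_min_version data (estimate_min_version data)

-- ===== LEMMAS AND PROOFS =====

theorem bl_leaf (n : Int) (lo : Nat) : bisectLoop n lo lo = lo := by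
  unfold bisectLoop
  simp

def bl_9_10_rhs (n : Int) : Nat :=
  (if (189:Int) < n then 10 else 9)

theorem bl_9_10 (n : Int) : bisectLoop n 9 10 = bl_9_10_rhs n := by
  unfold bisectLoop
  norm_num [pvCaps, bl_9_10_rhs]
  simp only [bl_leaf]

def bl_6_7_rhs (n : Int) : Nat :=
  (if (108:Int) < n then 7 else 6)

theorem bl_6_7 (n : Int) : bisectLoop n 6 7 = bl_6_7_rhs n := by
  unfold bisectLoop
  norm_num [pvCaps, bl_6_7_rhs]
  simp only [bl_leaf]

def bl_6_8_rhs (n : Int) : Nat :=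
  (if (124:Int) < n then 8 else bl_6_7_rhs n)

theorem bl_6_8 (n : Int) : bisectLoop n 6 8 = bl_6_8_rhs n := by
  unfold bisectLoop
  norm_num [pvCaps, bl_6_8_rhs]
  simp only [bl_leaf, bl_6_7, bl_6_7_rhs]

def bl_6_10_rhs (n : Int) : Nat :=
  (if (157:Int) < n then bl_9_10_rhs n else bl_6_8_rhs n)

theorem bl_6_10 (n : Int) : bisectLoop n 6 10 = bl_6_10_rhs n := by
  unfold bisectLoop
  norm_num [pvCaps, bl_6_10_rhs]
  simp only [bl_9_10, bl_9_10_rhs, bl_6_8, bl_6_8_rhs]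

def bl_3_4_rhs (n : Int) : Nat :=
  (if (36:Int) < n then 4 else 3)

theorem bl_3_4 (n : Int) : bisectLoop n 3 4 = bl_3_4_rhs n := by
  unfold bisectLoop
  norm_num [pvCaps, bl_3_4_rhs]
  simp only [bl_leaf]

def bl_3_5_rhs (n : Int) : Nat :=
  (if (68:Int) < n then 5 else bl_3_4_rhs n)

theorem bl_3_5 (n : Int) : bisectLoop n 3 5 = bl_3_5_rhs n := by
  unfold bisectLoop
  norm_num [pvCaps, bl_3_5_rhs]
  simp only [bl_leaf, bl_3_4, bl_3_4_rhs]

def bl_0_1_rhs (n : Int) : Nat :=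
  (if (9:Int) < n then 1 else 0)

theorem bl_0_1 (n : Int) : bisectLoop n 0 1 = bl_0_1_rhs n := by
  unfold bisectLoop
  norm_num [pvCaps, bl_0_1_rhs]
  simp only [bl_leaf]

def bl_0_2_rhs (n : Int) : Nat :=
  (if (16:Int) < n then 2 else bl_0_1_rhs n)

theorem bl_0_2 (n : Int) : bisectLoop n 0 2 = bl_0_2_rhs n := by
  unfold bisectLoop
  norm_num [pvCaps, bl_0_2_rhs]
  simp only [bl_leaf, bl_0_1, bl_0_1_rhs]

def bl_0_5_rhs (n : Int) : Nat :=
  (if (26:Int) < n then bl_3_5_rhs n else bl_0_2_rhs n)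

theorem bl_0_5 (n : Int) : bisectLoop n 0 5 = bl_0_5_rhs n := by
  unfold bisectLoop
  norm_num [pvCaps, bl_0_5_rhs]
  simp only [bl_3_5, bl_3_5_rhs, bl_0_2, bl_0_2_rhs]

def bl_0_10_rhs (n : Int) : Nat :=
  (if (86:Int) < n then bl_6_10_rhs n else bl_0_5_rhs n)

theorem bl_0_10 (n : Int) : bisectLoop n 0 10 = bl_0_10_rhs n := by
  unfold bisectLoop
  norm_num [pvCaps, bl_0_10_rhs]
  simp only [bl_6_10, bl_6_10_rhs, bl_0_5, bl_0_5_rhs]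

theorem key_lemma (n : Int) :
    min ((bisectLoop n 0 pvCaps.length : Int) + 1) 10 = scanThresholds n
      [(1, 9), (2, 16), (3, 26), (4, 36), (5, 68), (6, 86), (7, 108), (8, 124), (9, 157), (10, 189)] := by
  have h : pvCaps.length = 10 := rfl
  rw [h, bl_0_10]
  simp only [bl_0_10_rhs, bl_6_10_rhs, bl_0_5_rhs, bl_9_10_rhs, bl_6_8_rhs, bl_6_7_rhs,
    bl_3_5_rhs, bl_3_4_rhs, bl_0_2_rhs, bl_0_1_rhs, scanThresholds]
  push_cast [apply_ite (fun k : Nat => (k : Int))]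
  omega

-- ===== VERDICT (by name: the statement is the Claim_ definition above) =====
theorem estimate_min_version_spec : Claim_equal_estimate_min_version := by
  intro data _
  unfold Spec_estimate_min_version
  unfold estimate_min_version estimate_min_version_alt
  exact (key_lemma (PySem.Str.len data)).symm
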